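-- pv_equiv track=rewrite | github.com/thelawclaw11/python_algo | algorithmDesignManuel/seven/minimum_vertex_cover.py | find_minimum_vertex_cover_slow
-- ===== SOURCE A (Python) =====
-- def generate_all_subsets(nodes):
--     result = []
--     accum = []
--
--     def F(i):
--         if i >= len(nodes):
--             result.append(accum[:])
--             return
--
--         F(i + 1)
--         accum.append(nodes[i])
--         F(i + 1)
--         accum.pop()
--     F(0)
--     return result
--
-- def verify_subset_is_cover(subset, graph):
--     nodes_covered = {node for node in subset}
--
--     for node in subset:
--         for neighbor in graph[node]:
--             nodes_covered.add(neighbor)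
--
--     return len(nodes_covered) == len(graph)
--
-- def find_minimum_vertex_cover_slow(graph):
--     nodes = list(graph.keys())
--
--     subsets = generate_all_subsets(nodes)
--     result = []
--
--     for subset in subsets:
--         if verify_subset_is_cover(subset, graph) and (not result or len(subset) < len(result)):
--             result = subset
--
--     return result
-- ===== SOURCE B (Python) =====
-- def find_minimum_vertex_cover_slow(graph):
--     nodes = list(graph.keys())
--     n = len(nodes)
--     result = []
--     for mask in range(2 ** n):
--         subset = [nodes[i] for i in range(n) if (mask >> (n - 1 - i)) & 1]
--         covered = {v for v in subset}
--         for v in subset: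
--             covered.update(graph[v])
--         if len(covered) == len(graph) and (not result or len(subset) < len(result)):
--             result = subset
--     return result
-- ===== Notes on version B (the rewrite author's own statement) =====
-- stated objective: alternative
-- what changed: Replaces the recursive generator that materialises all 2^n subsets (plus a separate scan over that list) with a single iterative loop over bitmasks 0..2^n-1 that builds each subset on the fly (nodes[0] as the most-significant bit) and keeps a running best, never storing the subset list.
import Mathlib
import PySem

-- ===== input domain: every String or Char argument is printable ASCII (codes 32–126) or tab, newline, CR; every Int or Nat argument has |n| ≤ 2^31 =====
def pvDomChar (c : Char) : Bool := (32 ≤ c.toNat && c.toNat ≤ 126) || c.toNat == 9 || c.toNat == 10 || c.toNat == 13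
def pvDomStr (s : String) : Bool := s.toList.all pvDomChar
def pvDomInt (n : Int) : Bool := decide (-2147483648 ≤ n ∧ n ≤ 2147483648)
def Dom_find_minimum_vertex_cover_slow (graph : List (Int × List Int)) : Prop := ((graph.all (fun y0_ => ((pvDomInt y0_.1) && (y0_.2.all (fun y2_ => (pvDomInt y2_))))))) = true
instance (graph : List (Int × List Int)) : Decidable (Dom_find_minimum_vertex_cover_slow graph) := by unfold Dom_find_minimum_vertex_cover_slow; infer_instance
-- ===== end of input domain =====

-- B replaces A's recursive subset generator (which materialises all 2^n subsets first)
-- by a single iterative scan over integer bitmasks that builds each subset on the fly;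
-- objective: alternative decomposition (same exponential brute force, no materialised subset list).

-- ===== PORT A =====
-- inner recursive F of generate_all_subsets; i stays in [0, len nodes], so getD i 0 is exact (nodes[i] never raises)
def pvGenF (nodes : List Int) (i : Nat) (accum : List Int) : List (List Int) :=
  if _h : i ≥ nodes.length then [accum]
  else pvGenF nodes (i + 1) accum ++ pvGenF nodes (i + 1) (accum ++ [nodes.getD i 0])
termination_by nodes.length - i
decreasing_by all_goals omega

def generate_all_subsets (nodes : List Int) : List (List Int) := pvGenF nodes 0 []

-- subset elements are keys of graph, so graph[node] never raises; getD _ [] is exact there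
def verify_subset_is_cover (subset : List Int) (graph : PySem.Dict Int (List Int)) : Bool :=
  let covered := PySem.Set.ofList subset
  let covered := subset.foldl (fun s node =>
    (graph.getD node []).foldl (fun s neighbor => PySem.Set.add s neighbor) s) covered
  covered.length == graph.size

def find_minimum_vertex_cover_slow (graph : List (Int × List Int)) : List Int :=
  let g := PySem.Dict.mk graph
  let nodes := g.keys
  let subsets := generate_all_subsets nodes
  subsets.foldl (fun result subset =>
    if verify_subset_is_cover subset g && (result.isEmpty || subset.length < result.length)
    then subset else result) []

-- ===== PORT B =====
-- the comprehension [nodes[i] for i in range(n) if (mask >> (n-1-i)) & 1]; indices are in range, getD exact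
def pvMaskSubset (nodes : List Int) (n mask : Nat) : List Int :=
  (List.range n).filterMap (fun i =>
    if (mask >>> (n - 1 - i)) &&& 1 = 1 then some (nodes.getD i 0) else none)

-- covered = set(subset); for v in subset: covered.update(graph[v]); len(covered) == len(graph)
def pvIsCover (subset : List Int) (graph : PySem.Dict Int (List Int)) : Bool :=
  let covered := subset.foldl (fun s v => PySem.Set.update s (graph.getD v []))
    (PySem.Set.ofList subset)
  covered.length == graph.size

def find_minimum_vertex_cover_slow_alt (graph : List (Int × List Int)) : List Int :=
  let g := PySem.Dict.mk graph
  let nodes := g.keys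
  let n := nodes.length
  (List.range (2 ^ n)).foldl (fun result mask =>
    let subset := pvMaskSubset nodes n mask
    if pvIsCover subset g && (result.isEmpty || subset.length < result.length)
    then subset else result) []

-- ===== PRECONDITION & SPEC =====
def Spec_find_minimum_vertex_cover_slow (graph : List (Int × List Int)) (out : List Int) : Prop := out = find_minimum_vertex_cover_slow_alt graph
instance (graph : List (Int × List Int)) (out : List Int) : Decidable (Spec_find_minimum_vertex_cover_slow graph out) := by unfold Spec_find_minimum_vertex_cover_slow; infer_instance

-- ===== CLAIM (what is proved, stated in full; the proofs are below) =====
def Claim_equal_find_minimum_vertex_cover_slow : Prop := ∀ (graph : List (Int × List Int)), Dom_find_minimum_vertex_cover_slow graph → Spec_find_minimum_vertex_cover_slow graph (find_minimum_vertex_cover_slow graph)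

-- ===== LEMMAS AND PROOFS =====

-- bit p of m is m / 2^p % 2
theorem pvBit_eq (m p : Nat) : (m >>> p) &&& 1 = m / 2 ^ p % 2 := by
  rw [Nat.shiftRight_eq_div_pow, Nat.and_one_is_mod]

theorem pvBit_of_lt {m p : Nat} (h : m < 2 ^ p) : (m >>> p) &&& 1 = 0 := by
  rw [pvBit_eq, Nat.div_eq_of_lt h]

-- bits of 2^q + m for m < 2^q
theorem pvBit_add_pow_self {m q : Nat} (h : m < 2 ^ q) :
    ((2 ^ q + m) >>> q) &&& 1 = 1 := by
  rw [pvBit_eq, Nat.add_comm (2 ^ q) m, Nat.add_div_right m (Nat.two_pow_pos q), Nat.div_eq_of_lt h]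

theorem pvBit_add_pow_lt {m q p : Nat} (hp : p < q) :
    ((2 ^ q + m) >>> p) &&& 1 = (m >>> p) &&& 1 := by
  rw [pvBit_eq, pvBit_eq]
  have h2 : 2 ^ q = 2 ^ (q - p) * 2 ^ p := by
    rw [← pow_add]; congr 1; omega
  have hdiv : (2 ^ q + m) / 2 ^ p = m / 2 ^ p + 2 ^ (q - p) := by
    rw [Nat.add_comm (2 ^ q) m, h2, Nat.add_mul_div_right _ _ (Nat.two_pow_pos p)]
  rw [hdiv]
  have h3 : 2 ^ (q - p) = 2 ^ (q - p - 1) * 2 := by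
    rw [mul_comm, ← pow_succ']; congr 1; omega
  rw [h3, Nat.add_mul_mod_self_right]

theorem pvBit_add_pow_gt {m q p : Nat} (hm : m < 2 ^ q) (hp : q < p) :
    ((2 ^ q + m) >>> p) &&& 1 = 0 := by
  apply pvBit_of_lt
  calc 2 ^ q + m < 2 ^ q + 2 ^ q := by omega
    _ = 2 ^ (q + 1) := by ring
    _ ≤ 2 ^ p := Nat.pow_le_pow_right (by norm_num) (by omega)

-- key decomposition: setting bit (n-1-i) prepends nodes[i]
theorem pvMaskSubset_zero (nodes : List Int) (n : Nat) : pvMaskSubset nodes n 0 = [] := by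
  unfold pvMaskSubset
  apply List.filterMap_eq_nil_iff.mpr
  intro i _
  simp

theorem pvMaskSubset_add_pow (nodes : List Int) {n i m : Nat} (hi : i < n)
    (hm : m < 2 ^ (n - 1 - i)) :
    pvMaskSubset nodes n (2 ^ (n - 1 - i) + m) = nodes.getD i 0 :: pvMaskSubset nodes n m := by
  unfold pvMaskSubset
  have hsplit : List.range n = List.range i ++ (List.range (n - i)).map (i + ·) := by
    rw [← List.range_add]; congr 1; omega
  have hsplit2 : List.range (n - i) = 0 :: (List.range (n - i - 1)).map Nat.succ := by
    conv_lhs => rw [show n - i = (n - i - 1) + 1 from by omega]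
    rw [List.range_succ_eq_map]
  rw [hsplit, hsplit2]
  simp only [List.filterMap_append, List.map_cons, List.filterMap_cons, List.filterMap_map]
  have hlow : ∀ f : Nat → Nat, (∀ j, j < i → ((f j) >>> (n - 1 - j)) &&& 1 = 0) →
      List.filterMap (fun j => if ((f j) >>> (n - 1 - j)) &&& 1 = 1 then some (nodes.getD j 0) else none) (List.range i) = [] := by
    intro f hf
    apply List.filterMap_eq_nil_iff.mpr
    intro j hj
    rw [hf j (List.mem_range.mp hj)]
    simp
  have hbig : ∀ j < i, n - 1 - i < n - 1 - j := by omega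
  have h1 : List.filterMap (fun j => if (((2 ^ (n - 1 - i) + m)) >>> (n - 1 - j)) &&& 1 = 1 then some (nodes.getD j 0) else none) (List.range i) = [] := by
    apply hlow
    intro j hj
    exact pvBit_add_pow_gt hm (hbig j hj)
  have h2 : List.filterMap (fun j => if (m >>> (n - 1 - j)) &&& 1 = 1 then some (nodes.getD j 0) else none) (List.range i) = [] := by
    apply hlow
    intro j hj
    apply pvBit_of_lt
    exact lt_of_lt_of_le hm (Nat.pow_le_pow_right (by norm_num) (le_of_lt (hbig j hj)))
  rw [h1, h2]
  have hi0 : i + 0 = i := by omega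
  rw [hi0, pvBit_add_pow_self hm, pvBit_of_lt hm]
  simp only [reduceIte, List.nil_append]
  congr 1
  apply List.filterMap_congr
  intro t ht
  have ht' : t < n - i - 1 := List.mem_range.mp ht
  simp only [Function.comp_apply]
  have : ((2 ^ (n - 1 - i) + m) >>> (n - 1 - (i + t.succ))) &&& 1 = (m >>> (n - 1 - (i + t.succ))) &&& 1 :=
    pvBit_add_pow_lt (by omega)
  rw [this]

-- A's recursive generator enumerates exactly B's masks, MSB = nodes[0]
theorem pvGenF_eq (nodes : List Int) :
    ∀ (k i : Nat) (accum : List Int), i + k = nodes.length →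
      pvGenF nodes i accum
        = (List.range (2 ^ k)).map (fun m => accum ++ pvMaskSubset nodes nodes.length m) := by
  intro k
  induction k with
  | zero =>
    intro i accum h
    rw [pvGenF]
    simp [show i ≥ nodes.length by omega, pvMaskSubset_zero]
  | succ k ih =>
    intro i accum h
    rw [pvGenF]
    rw [dif_neg (by omega : ¬ i ≥ nodes.length)]
    rw [ih (i + 1) accum (by omega), ih (i + 1) (accum ++ [nodes.getD i 0]) (by omega)]
    have hrange : List.range (2 ^ (k + 1)) = List.range (2 ^ k) ++ (List.range (2 ^ k)).map (2 ^ k + ·) := by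
      rw [← List.range_add]; congr 1; ring
    rw [hrange, List.map_append, List.map_map]
    congr 1
    apply List.map_congr_left
    intro m hm
    have hm' : m < 2 ^ k := List.mem_range.mp hm
    have hk : k = nodes.length - 1 - i := by omega
    simp only [Function.comp]
    rw [hk] at hm' ⊢
    rw [pvMaskSubset_add_pow nodes (by omega) hm']
    simp

-- the two cover tests are the same computation (Set.update is the foldl of add)
theorem pvIsCover_eq (subset : List Int) (g : PySem.Dict Int (List Int)) :
    pvIsCover subset g = verify_subset_is_cover subset g := rfl

-- ===== VERDICT (by name: the statement is the Claim_ definition above) =====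
theorem find_minimum_vertex_cover_slow_spec : Claim_equal_find_minimum_vertex_cover_slow := by
  intro graph _
  unfold Spec_find_minimum_vertex_cover_slow
  unfold find_minimum_vertex_cover_slow find_minimum_vertex_cover_slow_alt generate_all_subsets
  dsimp only
  rw [pvGenF_eq (PySem.Dict.mk graph).keys (PySem.Dict.mk graph).keys.length 0 [] (by omega)]
  rw [List.foldl_map]
  simp [pvIsCover_eq]
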